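-- pv_equiv track=rewrite | github.com/dan-serraf/Analyseur_trame_reseau | Analyseur/Tcp.py | calcule_entete_http
-- ===== SOURCE A (Python) =====
-- def condition_fin_entete(liste,i):
--     #Test qu'il y a bien encore 4 éléments a lire
--     if len(liste) - i >= 4 :
--         liste[i] = liste[i].lower() #convertit minuscule
--         liste[i+1] = liste[i+1].lower()
--         liste[i+2] = liste[i+2].lower()
--         liste[i+3] = liste[i+3].lower()
--         return liste[i] == "0d" and liste[i+1] == "0a" and liste[i+2] == "0d" and liste[i+3] == "0a"
--     return True
--
-- def convert_hexa_to_string(hexa):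
--     code_ascii = int(hexa,16)
--     return chr(code_ascii)
--
-- def valide_http(liste) :
--
--     liste_resultat = []
--     if len(liste) >= 4 :
--
--         temp_str = ""
--         for i in range(4):
--             temp_str = temp_str + liste[i]
--             temp_str = temp_str.lower()
--             #Si la methode est post on traite normalement
--             if temp_str == "post" :
--
--                 return liste
--             #Si la methode est differente alors on prends on compte uniquement l'entete http
--         i = 0
--
--         while not condition_fin_entete(liste,i)  :
--             liste_resultat.append(liste[i])
--             i+=1
--
--         liste_resultat.append("0d")
--         liste_resultat.append("0a")
--         liste_resultat.append("0d")
--         liste_resultat.append("0a")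
--
--     return liste_resultat
--
-- def calcule_entete_http(liste) :
--     i = 0
--     #resultat est une liste[liste[str]] ou chaque liste corresponds a une ligne
--     #chaque ligne est composer de mot
--     resultat = []
--     temp_str = ""
--     temp_list = []
--
--
--     liste = valide_http(liste)
--
--     while not condition_fin_entete(liste,i):
--         liste[i] = liste[i].lower() #convertit minuscule
--         liste[i+1] = liste[i+1].lower()
--
--         if liste[i] == "20": #code ascii espace
--             temp_str = temp_str + " "
--             temp_list.append(temp_str)
--             temp_str = ""
--
--         elif liste[i] == "0a" and liste[i+1] != "0a" : #code ascii retour a la ligne ne pas ajouter saut de ligne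
--             i+= 1
--             continue
--
--         elif liste[i] == "0d" and liste[i+1] == "0a" : #code ascii retour a la ligne et retour chariot
--             temp_list.append(temp_str)
--             resultat.append(temp_list)
--             temp_str = ""
--             temp_list = []
--
--         else :
--             temp_str = temp_str + convert_hexa_to_string(liste[i])
--
--
--         i += 1
--
--     i+= 4 #On ajoute le 0x0d 0x0a 0x0d 0x0a qui indiquent la fin de l'entete
--     #On ajoute le dernier mot a notre ligne
--     temp_list.append(temp_str)
--     #On ajoute la derniere ligne au resultat
--     resultat.append(temp_list)
--     return resultat,i
-- ===== SOURCE B (Python) =====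
-- # Two-phase re-implementation: normalise to a lowercased token list, locate the
-- # header end, group tokens into lines at 0d0a, then render each line into words.
-- # Unlike A it does not mutate the caller's list (return value is identical).
--
-- TERM = ("0d", "0a", "0d", "0a")
--
--
-- def calcule_entete_http(liste):
--     toks = [s.lower() for s in liste]
--
--     # Mirror valide_http: POST short-circuit, otherwise truncate at the terminator.
--     if len(toks) >= 4:
--         acc = ""
--         post = False
--         for t in toks[:4]:
--             acc += t
--             if acc == "post":
--                 post = True
--                 break
--         if not post:
--             body = []
--             j = 0
--             while len(toks) - j >= 4 and (toks[j], toks[j + 1], toks[j + 2], toks[j + 3]) != TERM: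
--                 body.append(toks[j])
--                 j += 1
--             toks = body + list(TERM)
--     else:
--         toks = []
--
--     # Phase 0: number of tokens consumed by the header scan.
--     n = 0
--     while len(toks) - n >= 4 and (toks[n], toks[n + 1], toks[n + 2], toks[n + 3]) != TERM:
--         n += 1
--
--     # Phase 1: group consumed tokens into lines (0d0a ends a line, a lone 0a is dropped).
--     lines = []
--     cur = []
--     k = 0
--     while k < n:
--         t = toks[k]
--         if t == "0d" and toks[k + 1] == "0a":
--             lines.append(cur)
--             cur = []
--         elif t == "0a" and toks[k + 1] != "0a":
--             pass
--         else:
--             cur.append(t)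
--         k += 1
--     lines.append(cur)
--
--     # Phase 2: split each line's tokens into words at every 20 (space).
--     resultat = []
--     for line in lines:
--         words = []
--         w = ""
--         for t in line:
--             if t == "20":
--                 words.append(w + " ")
--                 w = ""
--             else:
--                 w += chr(int(t, 16))
--         words.append(w)
--         resultat.append(words)
--     return resultat, n + 4
-- ===== Notes on version B (the rewrite author's own statement) =====
-- stated objective: alternative
-- what changed: A's single stateful scan (temp_str/temp_list/resultat juggled in one while loop with in-place lowercasing) is replaced by a pipeline: lowercase once, locate the header end, group tokens into lines at 0d0a, then render each line into words; B does not mutate the caller's list, the return value is identical.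
import Mathlib
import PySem

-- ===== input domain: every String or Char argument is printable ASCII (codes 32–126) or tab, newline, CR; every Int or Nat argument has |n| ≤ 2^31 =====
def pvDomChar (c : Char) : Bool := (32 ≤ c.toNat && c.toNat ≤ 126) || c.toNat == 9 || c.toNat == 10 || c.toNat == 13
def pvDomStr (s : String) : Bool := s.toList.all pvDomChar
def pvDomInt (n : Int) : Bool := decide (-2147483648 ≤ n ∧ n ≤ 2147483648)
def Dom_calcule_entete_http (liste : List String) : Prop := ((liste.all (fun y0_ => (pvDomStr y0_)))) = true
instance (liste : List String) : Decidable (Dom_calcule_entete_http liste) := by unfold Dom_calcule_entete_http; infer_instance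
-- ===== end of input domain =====

-- B re-groups the token stream in two phases (lines, then words) instead of A's single
-- stateful loop; same return value everywhere on Pre_. A lowercases the caller's list in
-- place (and B does not): the equivalence proved here is about the RETURN value only.

-- ===== PORT A =====

-- chr(int(hexa, 16)): exact wherever Pre_ holds (the parse succeeds and the value is a
-- Unicode scalar); the `.getD 0` / `Char.ofNat` fallbacks are only reached outside Pre_.
def pyChr16 (hexa : String) : String :=
  String.singleton (Char.ofNat ((PySem.Int.ofStrBase? hexa 16).getD 0).toNat)

-- condition_fin_entete: mutates liste (4 in-place lowercasings), so the port returns the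
-- tested Bool together with the updated list.  (i is never negative in A, hence i : Nat.)
def cfe (liste : List String) (i : Nat) : Bool × List String :=
  if 4 ≤ liste.length - i then
    let l0 := liste.set i (PySem.Str.lower (liste.getD i ""))
    let l1 := l0.set (i+1) (PySem.Str.lower (l0.getD (i+1) ""))
    let l2 := l1.set (i+2) (PySem.Str.lower (l1.getD (i+2) ""))
    let l3 := l2.set (i+3) (PySem.Str.lower (l2.getD (i+3) ""))
    (decide (l3.getD i "" = "0d" ∧ l3.getD (i+1) "" = "0a" ∧ l3.getD (i+2) "" = "0d" ∧ l3.getD (i+3) "" = "0a"), l3)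
  else (true, liste)

theorem cfe_snd_length (liste : List String) (i : Nat) : ((cfe liste i).2).length = liste.length := by
  unfold cfe
  split <;> simp

theorem cfe_false_le (liste : List String) (i : Nat) (h : (cfe liste i).1 = false) : 4 ≤ liste.length - i := by
  by_contra hc
  unfold cfe at h
  rw [if_neg hc] at h
  simp at h

-- the while-loop of valide_http (liste_resultat is the accumulator; the four terminator
-- bytes appended after the loop are folded into the base case)
def valideLoop (liste : List String) (i : Nat) (acc : List String) : List String :=
  let r := cfe liste i
  if _hr : r.1 then acc ++ ["0d", "0a", "0d", "0a"]
  else valideLoop r.2 (i+1) (acc ++ [r.2.getD i ""])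
termination_by liste.length - i
decreasing_by
  have h1 := cfe_snd_length liste i
  have h2 := cfe_false_le liste i (by simpa using _hr)
  omega

-- valide_http; the `for i in range(4)` POST check is unrolled (fixed four iterations)
def valide_http (liste : List String) : List String :=
  if 4 ≤ liste.length then
    let t1 := PySem.Str.lower ("" ++ liste.getD 0 "")
    if t1 = "post" then liste else
    let t2 := PySem.Str.lower (t1 ++ liste.getD 1 "")
    if t2 = "post" then liste else
    let t3 := PySem.Str.lower (t2 ++ liste.getD 2 "")
    if t3 = "post" then liste else
    let t4 := PySem.Str.lower (t3 ++ liste.getD 3 "")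
    if t4 = "post" then liste else
    valideLoop liste 0 []
  else []

-- the main while-loop of calcule_entete_http, state (liste, i, temp_str, temp_list, resultat);
-- the post-loop `i += 4; temp_list.append(temp_str); resultat.append(temp_list)` is the base case
def mainLoop (liste : List String) (i : Nat) (ts : String) (tl : List String) (res : List (List String)) : List (List String) × Int :=
  let r := cfe liste i
  if hr : r.1 then (res ++ [tl ++ [ts]], (i : Int) + 4)
  else
    let l2 := r.2.set i (PySem.Str.lower (r.2.getD i ""))
    let l3 := l2.set (i+1) (PySem.Str.lower (l2.getD (i+1) ""))
    let t := l3.getD i ""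
    if t = "20" then mainLoop l3 (i+1) "" (tl ++ [ts ++ " "]) res
    else if t = "0a" ∧ l3.getD (i+1) "" ≠ "0a" then mainLoop l3 (i+1) ts tl res
    else if t = "0d" ∧ l3.getD (i+1) "" = "0a" then mainLoop l3 (i+1) "" [] (res ++ [tl ++ [ts]])
    else mainLoop l3 (i+1) (ts ++ pyChr16 t) tl res
termination_by liste.length - i
decreasing_by
  all_goals
    have h1 := cfe_snd_length liste i
    have h2 := cfe_false_le liste i (by simpa using hr)
    simp only [List.length_set]
    omega

def calcule_entete_http (liste : List String) : List (List String) × Int :=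
  mainLoop (valide_http liste) 0 "" [] []

-- ===== PORT B =====

-- B's POST check: cumulative concatenation over the (already lowercased) first four tokens
def checkPost (acc : String) (l : List String) : Bool :=
  match l with
  | [] => false
  | t :: ts => let acc' := acc ++ t; if acc' = "post" then true else checkPost acc' ts

-- B's truncation loop (tuple comparison `(toks[j],…,toks[j+3]) != TERM` ported componentwise)
def bodyLoop (toks : List String) (j : Nat) (acc : List String) : List String :=
  if 4 ≤ toks.length - j ∧ ¬(toks.getD j "" = "0d" ∧ toks.getD (j+1) "" = "0a" ∧ toks.getD (j+2) "" = "0d" ∧ toks.getD (j+3) "" = "0a")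
  then bodyLoop toks (j+1) (acc ++ [toks.getD j ""])
  else acc
termination_by toks.length - j
decreasing_by omega

-- phase 0: number of tokens the header scan consumes
def stopLoop (toks : List String) (n : Nat) : Nat :=
  if 4 ≤ toks.length - n ∧ ¬(toks.getD n "" = "0d" ∧ toks.getD (n+1) "" = "0a" ∧ toks.getD (n+2) "" = "0d" ∧ toks.getD (n+3) "" = "0a")
  then stopLoop toks (n+1)
  else n
termination_by toks.length - n
decreasing_by omega

-- phase 1: group tokens 0..n-1 into lines
def groupLoop (toks : List String) (k n : Nat) (cur : List String) (lines : List (List String)) : List (List String) :=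
  if k < n then
    let t := toks.getD k ""
    if t = "0d" ∧ toks.getD (k+1) "" = "0a" then groupLoop toks (k+1) n [] (lines ++ [cur])
    else if t = "0a" ∧ toks.getD (k+1) "" ≠ "0a" then groupLoop toks (k+1) n cur lines
    else groupLoop toks (k+1) n (cur ++ [t]) lines
  else lines ++ [cur]
termination_by n - k
decreasing_by all_goals omega

-- phase 2: split one line's tokens into words at every "20"
def lineLoop (words : List String) (w : String) (line : List String) : List String :=
  match line with
  | [] => words ++ [w]
  | t :: ts => if t = "20" then lineLoop (words ++ [w ++ " "]) "" ts else lineLoop words (w ++ pyChr16 t) ts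

def calcule_entete_http_alt (liste : List String) : List (List String) × Int :=
  let toks0 := liste.map PySem.Str.lower
  let toks :=
    if 4 ≤ toks0.length then
      if checkPost "" (toks0.take 4) then toks0
      else bodyLoop toks0 0 [] ++ ["0d", "0a", "0d", "0a"]
    else []
  let n := stopLoop toks 0
  let lines := groupLoop toks 0 n [] []
  (lines.map (fun l => lineLoop [] "" l), (n : Int) + 4)

-- ===== PRECONDITION & SPEC =====

-- int(s,16) succeeds and chr of the parsed value is a Unicode scalar Lean's Char can hold
def hexOK (s : String) : Bool :=
  match PySem.Int.ofStrBase? s 16 with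
  | some v => decide ((0 ≤ v ∧ v < 55296) ∨ (57344 ≤ v ∧ v < 1114112))
  | none => false

-- the lowercased window at j is the header terminator 0d 0a 0d 0a
def pvTermB (t : List String) (j : Nat) : Bool :=
  decide (t.getD j "" = "0d" ∧ t.getD (j+1) "" = "0a" ∧ t.getD (j+2) "" = "0d" ∧ t.getD (j+3) "" = "0a")

-- Pre_ excludes only tokens the header scan actually converts (index i with i+3 < len and no
-- terminator window at any j ≤ i): a non-hex or out-of-range token there makes A raise
-- ValueError in convert_hexa_to_string, and a valid-hex surrogate token there makes A return
-- a lone-surrogate string, which Lean's String cannot represent (B returns the same value in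
-- Python — see the cite in claim.json). Tokens at or after the terminator are unconstrained.
def Pre_calcule_entete_http (liste : List String) : Prop :=
  ∀ i < liste.length,
    (i + 3 < liste.length ∧ ∀ j ≤ i, pvTermB (liste.map PySem.Str.lower) j = false) →
    hexOK ((liste.map PySem.Str.lower).getD i "") = true

instance (liste : List String) : Decidable (Pre_calcule_entete_http liste) := by
  unfold Pre_calcule_entete_http; infer_instance

def pvWitness_calcule_entete_http : List String :=
  ["47", "45", "54", "20", "2f", "0d", "0a", "0d", "0a"]

def Spec_calcule_entete_http (liste : List String) (out : List (List String) × Int) : Prop := out = calcule_entete_http_alt liste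
instance (liste : List String) (out : List (List String) × Int) : Decidable (Spec_calcule_entete_http liste out) := by unfold Spec_calcule_entete_http; infer_instance

-- ===== CLAIM (what is proved, stated in full; the proofs are below) =====
def Claim_equal_calcule_entete_http : Prop := ∀ (liste : List String), Dom_calcule_entete_http liste → Pre_calcule_entete_http liste → Spec_calcule_entete_http liste (calcule_entete_http liste)

-- ===== LEMMAS AND PROOFS =====

-- ---- generic string facts ----

theorem lowerChar_idem (c : Char) : PySem.Chars.lowerChar (PySem.Chars.lowerChar c) = PySem.Chars.lowerChar c := by
  simp only [PySem.Chars.lowerChar, PySem.Chars.isupper]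
  by_cases h : 'A' ≤ c ∧ c ≤ 'Z'
  · simp only [h, decide_true, and_true, if_true, Bool.and_eq_true, decide_eq_true_eq]
    have hval : Nat.isValidChar (c.toNat + 32) := by
      have h1 : c.toNat ≤ 'Z'.toNat := h.2
      simp [Nat.isValidChar]
      simp at h1
      omega
    have hv : (Char.ofNat (c.toNat + 32)).toNat = c.toNat + 32 := by
      rw [Char.toNat_ofNat, if_pos hval]
    have hno : ¬ ('A' ≤ Char.ofNat (c.toNat + 32) ∧ Char.ofNat (c.toNat + 32) ≤ 'Z') := by
      intro h2
      have h3 : (Char.ofNat (c.toNat + 32)).toNat ≤ 'Z'.toNat := h2.2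
      have h4 : 'A'.toNat ≤ c.toNat := h.1
      rw [hv] at h3
      simp at h3 h4
      omega
    simp [hno]
  · have hb : ¬ (decide ('A' ≤ c) && decide (c ≤ 'Z')) = true := by simpa using h
    simp [hb]

theorem low_idem (s : String) : PySem.Str.lower (PySem.Str.lower s) = PySem.Str.lower s := by
  apply String.toList_inj.mp
  simp [PySem.Chars.lower, List.map_map, Function.comp_def, lowerChar_idem]

theorem low_append (a b : String) : PySem.Str.lower (a ++ b) = PySem.Str.lower a ++ PySem.Str.lower b := by
  apply String.toList_inj.mp
  simp [PySem.Chars.lower]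

theorem low_empty : PySem.Str.lower "" = "" := by decide

-- ---- getD / set bookkeeping ----

theorem getD_map_low (l : List String) (i : Nat) :
    (l.map PySem.Str.lower).getD i "" = PySem.Str.lower (l.getD i "") := by
  simp only [List.getD, List.getElem?_map]
  cases l[i]? <;> simp [low_empty]

theorem getD_set_self (l : List String) (i : Nat) (v : String) (h : i < l.length) :
    (l.set i v).getD i "" = v := by
  simp [List.getD, h]

theorem getD_set_ne (l : List String) (i j : Nat) (v : String) (h : j ≠ i) :
    (l.set i v).getD j "" = l.getD j "" := by
  simp [List.getD, List.getElem?_set_ne (by omega : i ≠ j)]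

theorem set_getD_self (l : List String) (i : Nat) : l.set i (l.getD i "") = l := by
  by_cases hi : i < l.length
  · have hv : l.getD i "" = l[i]'hi := by simp [List.getD, List.getElem?_eq_getElem hi]
    rw [hv]
    exact List.set_getElem_self hi
  · exact List.set_eq_of_length_le (by omega)

theorem map_low_set_low (l : List String) (i : Nat) :
    (l.set i (PySem.Str.lower (l.getD i ""))).map PySem.Str.lower = l.map PySem.Str.lower := by
  rw [List.map_set]
  rw [show PySem.Str.lower (PySem.Str.lower (l.getD i "")) = PySem.Str.lower (l.getD i "") from low_idem _]
  rw [← getD_map_low]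
  exact set_getD_self _ _

-- ---- characterisation of the ported condition_fin_entete ----

theorem cfe_spec (l : List String) (i : Nat) (h : 4 ≤ l.length - i) :
    (cfe l i).1 = decide ((l.map PySem.Str.lower).getD i "" = "0d" ∧ (l.map PySem.Str.lower).getD (i+1) "" = "0a" ∧ (l.map PySem.Str.lower).getD (i+2) "" = "0d" ∧ (l.map PySem.Str.lower).getD (i+3) "" = "0a")
    ∧ ((cfe l i).2).map PySem.Str.lower = l.map PySem.Str.lower
    ∧ (∀ j, i ≤ j → j < i + 4 → ((cfe l i).2).getD j "" = (l.map PySem.Str.lower).getD j "") := by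
  have hi0 : i < l.length := by omega
  have hi1 : i + 1 < l.length := by omega
  have hi2 : i + 2 < l.length := by omega
  have hi3 : i + 3 < l.length := by omega
  unfold cfe
  rw [if_pos h]
  dsimp only
  set l0 := l.set i (PySem.Str.lower (l.getD i "")) with hl0
  set l1 := l0.set (i+1) (PySem.Str.lower (l0.getD (i+1) "")) with hl1
  set l2 := l1.set (i+2) (PySem.Str.lower (l1.getD (i+2) "")) with hl2
  set l3 := l2.set (i+3) (PySem.Str.lower (l2.getD (i+3) "")) with hl3
  have len0 : l0.length = l.length := by simp [hl0]
  have len1 : l1.length = l.length := by simp [hl1, len0]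
  have len2 : l2.length = l.length := by simp [hl2, len1]
  have a0 : l3.getD i "" = PySem.Str.lower (l.getD i "") := by
    rw [hl3, getD_set_ne _ _ _ _ (by omega), hl2, getD_set_ne _ _ _ _ (by omega),
        hl1, getD_set_ne _ _ _ _ (by omega), hl0, getD_set_self _ _ _ hi0]
  have a1 : l3.getD (i+1) "" = PySem.Str.lower (l.getD (i+1) "") := by
    rw [hl3, getD_set_ne _ _ _ _ (by omega), hl2, getD_set_ne _ _ _ _ (by omega),
        hl1, getD_set_self _ _ _ (by omega : i + 1 < l0.length)]
    rw [hl0, getD_set_ne _ _ _ _ (by omega)]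
  have a2 : l3.getD (i+2) "" = PySem.Str.lower (l.getD (i+2) "") := by
    rw [hl3, getD_set_ne _ _ _ _ (by omega), hl2,
        getD_set_self _ _ _ (by omega : i + 2 < l1.length)]
    rw [hl1, getD_set_ne _ _ _ _ (by omega), hl0, getD_set_ne _ _ _ _ (by omega)]
  have a3 : l3.getD (i+3) "" = PySem.Str.lower (l.getD (i+3) "") := by
    rw [hl3, getD_set_self _ _ _ (by omega : i + 3 < l2.length)]
    rw [hl2, getD_set_ne _ _ _ _ (by omega), hl1, getD_set_ne _ _ _ _ (by omega),
        hl0, getD_set_ne _ _ _ _ (by omega)]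
  refine ⟨?_, ?_, ?_⟩
  · rw [a0, a1, a2, a3, ← getD_map_low, ← getD_map_low, ← getD_map_low, ← getD_map_low]
  · rw [hl3, map_low_set_low, hl2, map_low_set_low, hl1, map_low_set_low, hl0, map_low_set_low]
  · intro j hj1 hj2
    have : j = i ∨ j = i + 1 ∨ j = i + 2 ∨ j = i + 3 := by omega
    rcases this with rfl | rfl | rfl | rfl
    · rw [a0, getD_map_low]
    · rw [a1, getD_map_low]
    · rw [a2, getD_map_low]
    · rw [a3, getD_map_low]

-- ---- pure (mutation-free) form of A's main loop ----

def loopP (toks : List String) (i : Nat) (ts : String) (tl : List String) (res : List (List String)) : List (List String) × Int :=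
  if 4 ≤ toks.length - i ∧ ¬(toks.getD i "" = "0d" ∧ toks.getD (i+1) "" = "0a" ∧ toks.getD (i+2) "" = "0d" ∧ toks.getD (i+3) "" = "0a")
  then
    let t := toks.getD i ""
    if t = "20" then loopP toks (i+1) "" (tl ++ [ts ++ " "]) res
    else if t = "0a" ∧ toks.getD (i+1) "" ≠ "0a" then loopP toks (i+1) ts tl res
    else if t = "0d" ∧ toks.getD (i+1) "" = "0a" then loopP toks (i+1) "" [] (res ++ [tl ++ [ts]])
    else loopP toks (i+1) (ts ++ pyChr16 t) tl res
  else (res ++ [tl ++ [ts]], (i : Int) + 4)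
termination_by toks.length - i
decreasing_by all_goals omega

theorem mainLoop_eq_loopP (N : Nat) :
    ∀ (l : List String) (i : Nat) (ts : String) (tl : List String) (res : List (List String)),
      l.length - i ≤ N → mainLoop l i ts tl res = loopP (l.map PySem.Str.lower) i ts tl res := by
  induction N with
  | zero =>
    intro l i ts tl res h
    have hb : (cfe l i).1 = true := by
      by_contra hc
      have := cfe_false_le l i (by simpa using hc)
      omega
    rw [mainLoop, dif_pos hb, loopP, if_neg (by rintro ⟨h4, -⟩; simp at h4; omega)]
  | succ N ih =>
    intro l i ts tl res h
    rw [mainLoop]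
    by_cases hb : (cfe l i).1 = true
    · rw [dif_pos hb]
      by_cases h4 : 4 ≤ l.length - i
      · have hs := cfe_spec l i h4
        rw [hb] at hs
        have hcond := of_decide_eq_true hs.1.symm
        rw [loopP, if_neg (by rintro ⟨-, hc⟩; exact hc hcond)]
      · rw [loopP, if_neg (by rintro ⟨hc, -⟩; simp at hc; omega)]
    · have h4 := cfe_false_le l i (by simpa using hb)
      have hs := cfe_spec l i h4
      have hcond : ¬((l.map PySem.Str.lower).getD i "" = "0d" ∧ (l.map PySem.Str.lower).getD (i+1) "" = "0a" ∧ (l.map PySem.Str.lower).getD (i+2) "" = "0d" ∧ (l.map PySem.Str.lower).getD (i+3) "" = "0a") := by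
        have h1 := hs.1
        rw [Bool.not_eq_true] at hb
        rw [hb] at h1
        exact of_decide_eq_false h1.symm
      rw [dif_neg (by simpa using hb)]
      dsimp only
      have hr2len : ((cfe l i).2).length = l.length := cfe_snd_length l i
      set l2 := ((cfe l i).2).set i (PySem.Str.lower (((cfe l i).2).getD i "")) with hl2
      set l3 := l2.set (i+1) (PySem.Str.lower (l2.getD (i+1) "")) with hl3
      have hl2len : l2.length = l.length := by rw [hl2]; simp [hr2len]
      have hl3len : l3.length = l.length := by rw [hl3]; simp [hl2len]
      have g_i : ((cfe l i).2).getD i "" = (l.map PySem.Str.lower).getD i "" := hs.2.2 i le_rfl (by omega)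
      have g_i1 : ((cfe l i).2).getD (i+1) "" = (l.map PySem.Str.lower).getD (i+1) "" := hs.2.2 (i+1) (by omega) (by omega)
      have hMi : PySem.Str.lower ((l.map PySem.Str.lower).getD i "") = (l.map PySem.Str.lower).getD i "" := by
        rw [getD_map_low, low_idem]
      have hMi1 : PySem.Str.lower ((l.map PySem.Str.lower).getD (i+1) "") = (l.map PySem.Str.lower).getD (i+1) "" := by
        rw [getD_map_low, low_idem]
      have ht : l3.getD i "" = (l.map PySem.Str.lower).getD i "" := by
        rw [hl3, getD_set_ne _ _ _ _ (by omega), hl2, getD_set_self _ _ _ (by omega), g_i, hMi]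
      have ht1 : l3.getD (i+1) "" = (l.map PySem.Str.lower).getD (i+1) "" := by
        rw [hl3, getD_set_self _ _ _ (by omega), hl2, getD_set_ne _ _ _ _ (by omega), g_i1, hMi1]
      have hmap : l3.map PySem.Str.lower = l.map PySem.Str.lower := by
        rw [hl3, map_low_set_low, hl2, map_low_set_low, hs.2.1]
      have hrec : ∀ (ts' : String) (tl' : List String) (res' : List (List String)),
          mainLoop l3 (i+1) ts' tl' res' = loopP (l.map PySem.Str.lower) (i+1) ts' tl' res' := by
        intro ts' tl' res'
        rw [ih l3 (i+1) ts' tl' res' (by omega), hmap]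
      have hguard : 4 ≤ (l.map PySem.Str.lower).length - i ∧ ¬((l.map PySem.Str.lower).getD i "" = "0d" ∧ (l.map PySem.Str.lower).getD (i+1) "" = "0a" ∧ (l.map PySem.Str.lower).getD (i+2) "" = "0d" ∧ (l.map PySem.Str.lower).getD (i+3) "" = "0a") :=
        ⟨by simp only [List.length_map]; omega, hcond⟩
      rw [loopP, if_pos hguard]
      dsimp only
      rw [ht, ht1]
      split_ifs <;> exact hrec _ _ _

-- ---- A's valide loop = B's bodyLoop on the lowered list ----

theorem valideLoop_eq (N : Nat) :
    ∀ (l : List String) (i : Nat) (acc : List String),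
      l.length - i ≤ N → valideLoop l i acc = bodyLoop (l.map PySem.Str.lower) i acc ++ ["0d", "0a", "0d", "0a"] := by
  induction N with
  | zero =>
    intro l i acc h
    have hb : (cfe l i).1 = true := by
      by_contra hc
      have := cfe_false_le l i (by simpa using hc)
      omega
    rw [valideLoop]
    rw [dif_pos hb, bodyLoop, if_neg (by rintro ⟨h4, -⟩; simp at h4; omega)]
  | succ N ih =>
    intro l i acc h
    rw [valideLoop]
    by_cases hb : (cfe l i).1 = true
    · rw [dif_pos hb]
      by_cases h4 : 4 ≤ l.length - i
      · have hs := cfe_spec l i h4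
        rw [hb] at hs
        have hcond := of_decide_eq_true hs.1.symm
        rw [bodyLoop, if_neg (by rintro ⟨-, hc⟩; exact hc hcond)]
      · rw [bodyLoop, if_neg (by rintro ⟨hc, -⟩; simp at hc; omega)]
    · have h4 := cfe_false_le l i (by simpa using hb)
      have hs := cfe_spec l i h4
      have hcond : ¬((l.map PySem.Str.lower).getD i "" = "0d" ∧ (l.map PySem.Str.lower).getD (i+1) "" = "0a" ∧ (l.map PySem.Str.lower).getD (i+2) "" = "0d" ∧ (l.map PySem.Str.lower).getD (i+3) "" = "0a") := by
        have h1 := hs.1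
        rw [Bool.not_eq_true] at hb
        rw [hb] at h1
        exact of_decide_eq_false h1.symm
      rw [dif_neg (by simpa using hb)]
      have hlen := cfe_snd_length l i
      rw [ih (cfe l i).2 (i+1) (acc ++ [((cfe l i).2).getD i ""]) (by omega)]
      rw [hs.2.1, hs.2.2 i le_rfl (by omega)]
      rw [show bodyLoop (l.map PySem.Str.lower) i acc = bodyLoop (l.map PySem.Str.lower) (i+1) (acc ++ [(l.map PySem.Str.lower).getD i ""]) from by
        rw [bodyLoop, if_pos ⟨by simp; omega, hcond⟩]]

-- ---- line grouping / word splitting, recursion-first forms ----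

def consHead (t : String) : List (List String) → List (List String)
  | [] => [[t]]
  | l :: ls => (t :: l) :: ls

def consS (w : String) : List String → List String
  | [] => [w]
  | x :: xs => (w ++ x) :: xs

def consL (c : List String) : List (List String) → List (List String)
  | [] => [c]
  | x :: xs => (c ++ x) :: xs

def grp (toks : List String) (i : Nat) : List (List String) :=
  if 4 ≤ toks.length - i ∧ ¬(toks.getD i "" = "0d" ∧ toks.getD (i+1) "" = "0a" ∧ toks.getD (i+2) "" = "0d" ∧ toks.getD (i+3) "" = "0a")
  then
    let t := toks.getD i ""
    if t = "0d" ∧ toks.getD (i+1) "" = "0a" then [] :: grp toks (i+1)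
    else if t = "0a" ∧ toks.getD (i+1) "" ≠ "0a" then grp toks (i+1)
    else consHead t (grp toks (i+1))
  else [[]]
termination_by toks.length - i
decreasing_by all_goals omega

def grpN (toks : List String) (k n : Nat) : List (List String) :=
  if k < n then
    let t := toks.getD k ""
    if t = "0d" ∧ toks.getD (k+1) "" = "0a" then [] :: grpN toks (k+1) n
    else if t = "0a" ∧ toks.getD (k+1) "" ≠ "0a" then grpN toks (k+1) n
    else consHead t (grpN toks (k+1) n)
  else [[]]
termination_by n - k
decreasing_by all_goals omega

def wrd : List String → List String
  | [] => [""]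
  | t :: ts => if t = "20" then " " :: wrd ts else consS (pyChr16 t) (wrd ts)

def render (tl : List String) (ts : String) : List (List String) → List (List String)
  | [] => [tl ++ [ts]]
  | l :: rest => (tl ++ consS ts (wrd l)) :: rest.map wrd

theorem consHead_ne_nil (t : String) (g : List (List String)) : consHead t g ≠ [] := by
  cases g <;> simp [consHead]

theorem consS_ne_nil (w : String) (g : List String) : consS w g ≠ [] := by
  cases g <;> simp [consS]

theorem grp_ne_nil_aux (N : Nat) : ∀ (toks : List String) (i : Nat), toks.length - i ≤ N → grp toks i ≠ [] := by
  induction N with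
  | zero =>
    intro toks i h
    rw [grp, if_neg (by omega)]
    simp
  | succ n ih =>
    intro toks i h
    rw [grp]
    dsimp only
    split_ifs with h1 h2 h3
    · simp
    · exact ih toks (i+1) (by omega)
    · exact consHead_ne_nil _ _
    · simp

theorem grp_ne_nil (toks : List String) (i : Nat) : grp toks i ≠ [] :=
  grp_ne_nil_aux (toks.length - i) toks i le_rfl

theorem grpN_ne_nil_aux (N : Nat) : ∀ (toks : List String) (k n : Nat), n - k ≤ N → grpN toks k n ≠ [] := by
  induction N with
  | zero =>
    intro toks k n h
    rw [grpN, if_neg (by omega)]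
    simp
  | succ m ih =>
    intro toks k n h
    rw [grpN]
    dsimp only
    split_ifs with h1 h2 h3
    · simp
    · exact ih toks (k+1) n (by omega)
    · exact consHead_ne_nil _ _
    · simp

theorem grpN_ne_nil (toks : List String) (k n : Nat) : grpN toks k n ≠ [] :=
  grpN_ne_nil_aux (n - k) toks k n le_rfl

theorem wrd_ne_nil (l : List String) : wrd l ≠ [] := by
  induction l with
  | nil => simp [wrd]
  | cons t ts ih =>
    rw [wrd]
    split_ifs
    · simp
    · exact consS_ne_nil _ _

-- ---- central invariant: A's loop renders the grouped lines ----

theorem loopP_render (N : Nat) :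
    ∀ (toks : List String) (i : Nat) (ts : String) (tl : List String) (res : List (List String)),
      toks.length - i ≤ N →
      loopP toks i ts tl res = (res ++ render tl ts (grp toks i), (stopLoop toks i : Int) + 4) := by
  induction N with
  | zero =>
    intro toks i ts tl res h
    rw [loopP, if_neg (by rintro ⟨h4, -⟩; omega), grp, if_neg (by rintro ⟨h4, -⟩; omega)]
    rw [show stopLoop toks i = i from by rw [stopLoop, if_neg (by rintro ⟨h4, -⟩; omega)]]
    simp [render, wrd, consS]
  | succ N ih =>
    intro toks i ts tl res h
    by_cases hg : 4 ≤ toks.length - i ∧ ¬(toks.getD i "" = "0d" ∧ toks.getD (i+1) "" = "0a" ∧ toks.getD (i+2) "" = "0d" ∧ toks.getD (i+3) "" = "0a")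
    · have hstop : stopLoop toks i = stopLoop toks (i+1) := by rw [stopLoop, if_pos hg]
      rw [loopP, if_pos hg, grp, if_pos hg]
      dsimp only
      rcases hG : grp toks (i+1) with _ | ⟨x, xs⟩
      · exact absurd hG (grp_ne_nil _ _)
      rcases hw : wrd x with _ | ⟨y, ys⟩
      · exact absurd hw (wrd_ne_nil _)
      by_cases h20 : toks.getD i "" = "20"
      · rw [if_pos h20]
        rw [if_neg (by rw [h20]; rintro ⟨hc, -⟩; exact absurd hc (by decide))]
        rw [if_neg (by rw [h20]; rintro ⟨hc, -⟩; exact absurd hc (by decide))]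
        rw [ih toks (i+1) "" (tl ++ [ts ++ " "]) res (by omega), hstop, hG, h20]
        simp [render, consHead, wrd, consS, hw, String.empty_append]
      · rw [if_neg h20]
        by_cases h0a : toks.getD i "" = "0a" ∧ toks.getD (i+1) "" ≠ "0a"
        · rw [if_pos h0a]
          rw [if_neg (by rw [h0a.1]; rintro ⟨hc, -⟩; exact absurd hc (by decide))]
          rw [if_pos h0a]
          rw [ih toks (i+1) ts tl res (by omega), hstop, hG]
        · rw [if_neg h0a]
          by_cases h0d : toks.getD i "" = "0d" ∧ toks.getD (i+1) "" = "0a"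
          · rw [if_pos h0d, if_pos h0d]
            rw [ih toks (i+1) "" [] (res ++ [tl ++ [ts]]) (by omega), hstop, hG]
            simp [render, wrd, consS, hw, String.empty_append]
          · rw [if_neg h0d, if_neg h0d, if_neg h0a]
            rw [ih toks (i+1) (ts ++ pyChr16 (toks.getD i "")) tl res (by omega), hstop, hG]
            simp only [List.getD] at h20
            simp [render, consHead, wrd, consS, hw, h20, String.append_assoc, List.getD]
    · rw [loopP, if_neg hg, grp, if_neg hg]
      rw [show stopLoop toks i = i from by rw [stopLoop, if_neg hg]]
      simp [render, wrd, consS]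

-- ---- B's accumulator loops in recursion-first form ----

theorem groupLoop_eq_aux (N : Nat) :
    ∀ (toks : List String) (k n : Nat) (cur : List String) (lines : List (List String)),
      n - k ≤ N → groupLoop toks k n cur lines = lines ++ consL cur (grpN toks k n) := by
  induction N with
  | zero =>
    intro toks k n cur lines h
    rw [groupLoop, if_neg (by omega), grpN, if_neg (by omega)]
    simp [consL]
  | succ m ih =>
    intro toks k n cur lines h
    rw [groupLoop, grpN]
    by_cases hk : k < n
    · rw [if_pos hk, if_pos hk]
      dsimp only
      split_ifs with h1 h2
      · rw [ih toks (k+1) n [] (lines ++ [cur]) (by omega)]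
        rcases hg : grpN toks (k+1) n with _ | ⟨x, xs⟩
        · exact absurd hg (grpN_ne_nil _ _ _)
        · simp [consL]
      · exact ih toks (k+1) n cur lines (by omega)
      · rw [ih toks (k+1) n (cur ++ [toks.getD k ""]) lines (by omega)]
        rcases hg : grpN toks (k+1) n with _ | ⟨x, xs⟩
        · exact absurd hg (grpN_ne_nil _ _ _)
        · simp [consL, consHead]
    · rw [if_neg hk, if_neg hk]
      simp [consL]

theorem groupLoop_eq (toks : List String) (k n : Nat) (cur : List String) (lines : List (List String)) :
    groupLoop toks k n cur lines = lines ++ consL cur (grpN toks k n) :=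
  groupLoop_eq_aux (n - k) toks k n cur lines le_rfl

theorem stop_ge_aux (N : Nat) : ∀ (toks : List String) (i : Nat), toks.length - i ≤ N → i ≤ stopLoop toks i := by
  induction N with
  | zero =>
    intro toks i h
    rw [stopLoop, if_neg (by omega)]
  | succ m ih =>
    intro toks i h
    rw [stopLoop]
    split_ifs with h1
    · exact le_trans (by omega) (ih toks (i+1) (by omega))
    · exact le_rfl

theorem stop_ge (toks : List String) (i : Nat) : i ≤ stopLoop toks i :=
  stop_ge_aux (toks.length - i) toks i le_rfl

theorem grpN_stop_aux (N : Nat) : ∀ (toks : List String) (k : Nat), toks.length - k ≤ N → grpN toks k (stopLoop toks k) = grp toks k := by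
  induction N with
  | zero =>
    intro toks k h
    rw [show stopLoop toks k = k from by rw [stopLoop, if_neg (by rintro ⟨h4, -⟩; omega)]]
    rw [grpN, if_neg (by omega), grp, if_neg (by rintro ⟨h4, -⟩; omega)]
  | succ N ih =>
    intro toks k h
    by_cases hg : 4 ≤ toks.length - k ∧ ¬(toks.getD k "" = "0d" ∧ toks.getD (k+1) "" = "0a" ∧ toks.getD (k+2) "" = "0d" ∧ toks.getD (k+3) "" = "0a")
    · have hstop : stopLoop toks k = stopLoop toks (k+1) := by rw [stopLoop, if_pos hg]
      have hlt : k < stopLoop toks (k+1) := lt_of_lt_of_le (by omega) (stop_ge toks (k+1))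
      rw [hstop, grpN, if_pos hlt, grp, if_pos hg]
      dsimp only
      rw [ih toks (k+1) (by omega)]
    · rw [show stopLoop toks k = k from by rw [stopLoop, if_neg hg]]
      rw [grpN, if_neg (by omega), grp, if_neg hg]

theorem grpN_stop (toks : List String) (k : Nat) : grpN toks k (stopLoop toks k) = grp toks k :=
  grpN_stop_aux (toks.length - k) toks k le_rfl

theorem lineLoop_eq (line : List String) :
    ∀ (words : List String) (w : String), lineLoop words w line = words ++ consS w (wrd line) := by
  induction line with
  | nil => intro words w; simp [lineLoop, wrd, consS]
  | cons t ts ih =>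
    intro words w
    rw [lineLoop, wrd]
    rcases hw : wrd ts with _ | ⟨x, xs⟩
    · exact absurd hw (wrd_ne_nil _)
    · split_ifs with h1
      · rw [ih, hw]
        simp [consS]
      · rw [ih, hw]
        simp [consS, String.append_assoc]

-- ---- the lowered list is a fixpoint of lowering ----

theorem bodyLoop_low (toks : List String) (hl : ∀ x ∈ toks, PySem.Str.lower x = x) (N : Nat) :
    ∀ (j : Nat) (acc : List String), toks.length - j ≤ N → (∀ x ∈ acc, PySem.Str.lower x = x) →
      (bodyLoop toks j acc).map PySem.Str.lower = bodyLoop toks j acc := by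
  induction N with
  | zero =>
    intro j acc h hacc
    rw [bodyLoop, if_neg (by rintro ⟨h4, -⟩; omega)]
    rw [show acc.map PySem.Str.lower = acc.map id from List.map_congr_left (by simpa using hacc), List.map_id]
  | succ N ih =>
    intro j acc h hacc
    rw [bodyLoop]
    split_ifs with hg
    · refine ih (j+1) _ (by omega) ?_
      intro x hx
      rcases List.mem_append.mp hx with hx | hx
      · exact hacc x hx
      · have hj : j < toks.length := by omega
        have hmem : toks.getD j "" ∈ toks := by
          simp only [List.getD, List.getElem?_eq_getElem hj, Option.getD_some]
          exact List.getElem_mem hj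
        simp only [List.mem_singleton] at hx
        subst hx
        exact hl _ hmem
    · rw [show acc.map PySem.Str.lower = acc.map id from List.map_congr_left (by simpa using hacc), List.map_id]

-- ---- POST check: A's unrolled test = B's checkPost ----

theorem valide_eq (l : List String) (h : 4 ≤ l.length) :
    valide_http l = if checkPost "" ((l.map PySem.Str.lower).take 4) then l else valideLoop l 0 [] := by
  rcases l with - | ⟨a, l⟩; · simp at h
  rcases l with - | ⟨b, l⟩; · simp at h
  rcases l with - | ⟨c, l⟩; · simp at h
  rcases l with - | ⟨d, rest⟩; · simp at h
  rw [valide_http, if_pos h]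
  simp only [List.map_cons, List.take_succ_cons, List.take_zero, List.getD_cons_zero, List.getD_cons_succ]
  simp only [checkPost]
  simp only [low_append, low_empty, low_idem]
  by_cases h1 : PySem.Str.lower a = "post"
  · simp [h1]
  · rw [if_neg (by simpa using h1)]
    by_cases h2 : PySem.Str.lower a ++ PySem.Str.lower b = "post"
    · simp [h1, h2]
    · by_cases h3 : PySem.Str.lower a ++ PySem.Str.lower b ++ PySem.Str.lower c = "post"
      · simp [h1, h2, h3]
      · by_cases h5 : PySem.Str.lower a ++ PySem.Str.lower b ++ PySem.Str.lower c ++ PySem.Str.lower d = "post"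
        · simp [h1, h2, h3, h5]
        · simp [h1, h2, h3, h5]

theorem wrd_of_lineLoop (y : List String) : lineLoop [] "" y = wrd y := by
  rw [lineLoop_eq]
  rcases hw : wrd y with - | ⟨u, us⟩
  · exact absurd hw (wrd_ne_nil _)
  · simp [consS]

-- the common tail of both programs, phrased on an arbitrary token list
theorem loopP_pipeline (toks : List String) :
    loopP toks 0 "" [] [] =
      ((groupLoop toks 0 (stopLoop toks 0) [] []).map (fun l => lineLoop [] "" l), ((stopLoop toks 0 : Int)) + 4) := by
  rw [loopP_render (toks.length) toks 0 "" [] [] (by omega), groupLoop_eq, grpN_stop]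
  rcases hG : grp toks 0 with - | ⟨x, xs⟩
  · exact absurd hG (grp_ne_nil _ _)
  rcases hw : wrd x with - | ⟨u, us⟩
  · exact absurd hw (wrd_ne_nil _)
  simp [render, consL, consS, hw, wrd_of_lineLoop]

theorem main_equiv (l : List String) : calcule_entete_http l = calcule_entete_http_alt l := by
  unfold calcule_entete_http calcule_entete_http_alt
  dsimp only
  by_cases h4 : 4 ≤ l.length
  · have h4' : 4 ≤ (l.map PySem.Str.lower).length := by simpa using h4
    rw [valide_eq l h4, if_pos h4']
    by_cases hp : checkPost "" ((l.map PySem.Str.lower).take 4) = true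
    · rw [if_pos hp, if_pos hp]
      rw [mainLoop_eq_loopP (l.length) l 0 "" [] [] (by omega)]
      exact loopP_pipeline _
    · rw [if_neg hp, if_neg hp]
      have hT : valideLoop l 0 [] = bodyLoop (l.map PySem.Str.lower) 0 [] ++ ["0d", "0a", "0d", "0a"] :=
        valideLoop_eq (l.length) l 0 [] (by omega)
      rw [hT]
      set T := bodyLoop (l.map PySem.Str.lower) 0 [] ++ ["0d", "0a", "0d", "0a"] with hTdef
      rw [mainLoop_eq_loopP (T.length) T 0 "" [] [] (by omega)]
      have hTlow : T.map PySem.Str.lower = T := by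
        rw [hTdef, List.map_append]
        rw [bodyLoop_low (l.map PySem.Str.lower) (by intro x hx; rcases List.mem_map.mp hx with ⟨y, -, rfl⟩; exact low_idem y) (l.length) 0 [] (by simp) (by simp)]
        rfl
      rw [hTlow]
      exact loopP_pipeline _
  · rw [valide_http, if_neg h4, if_neg (by simpa using h4)]
    have hc : cfe ([] : List String) 0 = (true, []) := by
      rw [cfe, if_neg (by simp)]
    rw [mainLoop]
    rw [hc]
    rw [show stopLoop ([] : List String) 0 = 0 from by rw [stopLoop, if_neg (by simp)]]
    rw [show groupLoop ([] : List String) 0 0 [] [] = [[]] from by rw [groupLoop, if_neg (by omega)]; rfl]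
    simp [lineLoop]

-- ===== VERDICT (by name: the statement is the Claim_ definition above) =====
theorem calcule_entete_http_spec : Claim_equal_calcule_entete_http := by
  intro liste _ _
  unfold Spec_calcule_entete_http
  exact main_equiv liste
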